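-- pv_equiv track=rewrite | github.com/digitalpalidictionary/dpd-db | scripts/suttas/vaggas/compile_vaggas.py | group_by_code
-- ===== SOURCE A (Python) =====
-- from collections import defaultdict
--
-- def group_by_code(
--     entries: list[tuple[int, str, str]],
-- ) -> dict[str, tuple[str, str]]:
--     """Group entries by dpd_code; return code -> (primary_lemma, var_lemmas).
--
--     lemma_1 is kept verbatim (including homonym numbers) for DB lookup correctness.
--     """
--     grouped: dict[str, list[tuple[int, str]]] = defaultdict(list)
--     for hw_id, lemma_1, dpd_code in entries:
--         grouped[dpd_code].append((hw_id, lemma_1))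
--
--     result: dict[str, tuple[str, str]] = {}
--     for dpd_code, members in grouped.items():
--         members.sort(key=lambda x: x[0])
--         primary = members[0][1]
--         variants = "; ".join(lm for _, lm in members[1:])
--         result[dpd_code] = (primary, variants)
--
--     return result
-- ===== SOURCE B (Python) =====
-- def group_by_code(
--     entries: list[tuple[int, str, str]],
-- ) -> dict[str, tuple[str, str]]:
--     """Group entries by dpd_code; return code -> (primary_lemma, var_lemmas).
--
--     One global stable sort by hw_id replaces the per-group sorts: after it,
--     each group's lemmas are already in order, so grouping is a single linear
--     pass; keys are emitted in first-occurrence order via dict.fromkeys.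
--     """
--     grouped: dict[str, list[str]] = {}
--     for _hw_id, lemma_1, dpd_code in sorted(entries, key=lambda e: e[0]):
--         grouped.setdefault(dpd_code, []).append(lemma_1)
--     return {
--         dpd_code: (grouped[dpd_code][0], "; ".join(grouped[dpd_code][1:]))
--         for dpd_code in dict.fromkeys(code for _, _, code in entries)
--     }
-- ===== Notes on version B (the rewrite author's own statement) =====
-- stated objective: alternative
-- what changed: B replaces A's group-then-sort-each-group (dict of (hw_id,lemma) lists, per-group sort inside the result loop) with one global stable sort by hw_id followed by a linear grouping pass, emitting keys in first-occurrence order via dict.fromkeys.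
import Mathlib
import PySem

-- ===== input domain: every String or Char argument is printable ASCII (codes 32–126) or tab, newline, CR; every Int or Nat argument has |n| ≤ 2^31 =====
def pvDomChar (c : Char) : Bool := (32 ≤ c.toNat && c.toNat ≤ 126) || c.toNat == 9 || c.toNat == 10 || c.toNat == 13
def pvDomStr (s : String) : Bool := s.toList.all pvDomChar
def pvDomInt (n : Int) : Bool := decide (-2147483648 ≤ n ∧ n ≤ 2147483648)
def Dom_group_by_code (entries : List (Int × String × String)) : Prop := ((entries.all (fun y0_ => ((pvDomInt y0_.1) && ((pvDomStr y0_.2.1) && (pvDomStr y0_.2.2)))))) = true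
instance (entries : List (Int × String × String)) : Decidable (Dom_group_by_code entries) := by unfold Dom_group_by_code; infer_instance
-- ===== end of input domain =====

-- B replaces A's group-then-sort-each-group with one global stable sort plus a linear grouping pass (alternative decomposition, same asymptotic cost).

-- ===== PORT A =====
def group_by_code (entries : List (Int × String × String)) : List (String × String × String) :=
  -- grouped[dpd_code].append((hw_id, lemma_1))
  let grouped : PySem.Dict String (List (Int × String)) :=
    entries.foldl (fun d e => d.modify e.2.2 [] (fun l => l ++ [(e.1, e.2.1)])) PySem.Dict.empty
  -- for dpd_code, members in grouped.items(): members.sort(key=...); ...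
  let result : PySem.Dict String (String × String) :=
    grouped.items.foldl (fun r p =>
      let members := PySem.List.sorted p.2 (fun x => x.1)
      -- members[0][1]; every group is nonempty, so the default is never used
      let primary := ((PySem.List.pyGet? members 0).getD (0, "")).2
      let variants := PySem.Str.join "; " ((PySem.List.slice members (some 1) none).map (fun x => x.2))
      r.insert p.1 (primary, variants)) PySem.Dict.empty
  result.items

-- ===== PORT B =====
def group_by_code_alt (entries : List (Int × String × String)) : List (String × String × String) :=
  -- for _, lemma_1, dpd_code in sorted(entries, key=lambda e: e[0]): grouped.setdefault(dpd_code, []).append(lemma_1)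
  let grouped : PySem.Dict String (List String) :=
    (PySem.List.sorted entries (fun e => e.1)).foldl
      (fun d e => d.modify e.2.2 [] (fun l => l ++ [e.2.1])) PySem.Dict.empty
  -- {code: (grouped[code][0], "; ".join(grouped[code][1:])) for code in dict.fromkeys(codes)}
  let result : PySem.Dict String (String × String) :=
    (PySem.List.dedup (entries.map (fun e => e.2.2))).foldl (fun r c =>
      -- grouped[c]: c always present (it comes from entries), so KeyError is impossible
      let lemmas := (grouped.get? c).getD []
      r.insert c ((PySem.List.pyGet? lemmas 0).getD "",
                  PySem.Str.join "; " (PySem.List.slice lemmas (some 1) none))) PySem.Dict.empty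
  result.items

-- ===== PRECONDITION & SPEC =====
def Spec_group_by_code (entries : List (Int × String × String)) (out : List (String × String × String)) : Prop := out = group_by_code_alt entries
instance (entries : List (Int × String × String)) (out : List (String × String × String)) : Decidable (Spec_group_by_code entries out) := by unfold Spec_group_by_code; infer_instance

-- ===== CLAIM (what is proved, stated in full; the proofs are below) =====
def Claim_equal_group_by_code : Prop := ∀ (entries : List (Int × String × String)), Dom_group_by_code entries → Spec_group_by_code entries (group_by_code entries)

-- ===== LEMMAS AND PROOFS =====

-- insertBy of a mapped element into a mapped list
theorem pv_insertBy_map {α β κ : Type} [LinearOrder κ] (g : α → β) (k : β → κ) (k' : α → κ)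
    (h : ∀ a, k (g a) = k' a) (x : α) (ys : List α) :
    PySem.List.insertBy (fun a b => decide (k a < k b)) (g x) (ys.map g)
      = (PySem.List.insertBy (fun a b => decide (k' a < k' b)) x ys).map g := by
  induction ys with
  | nil => simp [PySem.List.insertBy]
  | cons y ys ih =>
    simp only [List.map_cons, PySem.List.insertBy, h]
    by_cases hb : k' x < k' y
    · simp [hb]
    · simp [hb, ih]

theorem pv_sorted_map {α β κ : Type} [LinearOrder κ] (g : α → β) (k : β → κ) (k' : α → κ)
    (h : ∀ a, k (g a) = k' a) (l : List α) :
    PySem.List.sorted (l.map g) k = (PySem.List.sorted l k').map g := by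
  rw [PySem.List.sorted_eq_foldl_insertBy, PySem.List.sorted_eq_foldl_insertBy, List.foldl_map]
  suffices H : ∀ (l : List α) (acc : List α),
      l.foldl (fun acc a => PySem.List.insertBy (fun a b => decide (k a < k b)) (g a) acc) (acc.map g)
        = (l.foldl (fun acc a => PySem.List.insertBy (fun a b => decide (k' a < k' b)) a acc) acc).map g by
    simpa using H l []
  intro l
  induction l with
  | nil => intro acc; simp
  | cons a l ih =>
    intro acc
    simp only [List.foldl_cons]
    rw [pv_insertBy_map g k k' h a acc]
    exact ih _

-- filtering past an element that fails the predicate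
theorem pv_filter_insertBy_neg {α : Type} (b : α → α → Bool) (p : α → Bool) (x : α)
    (hx : p x = false) (ys : List α) :
    (PySem.List.insertBy b x ys).filter p = ys.filter p := by
  induction ys with
  | nil => simp [PySem.List.insertBy, hx]
  | cons y ys ih =>
    simp only [PySem.List.insertBy]
    by_cases hb : b x y = true
    · simp [hb, hx]
    · simp only [hb]
      by_cases hp : p y = true <;> simp [hp, ih]

-- stable insertion into a sorted list commutes with filtering (the element kept)
theorem pv_insertBy_filter {α κ : Type} [LinearOrder κ] (k : α → κ) (p : α → Bool) (x : α)
    (hx : p x = true) (ys : List α) (hys : ys.Pairwise (fun a b => k a ≤ k b)) :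
    PySem.List.insertBy (fun a b => decide (k a < k b)) x (ys.filter p)
      = (PySem.List.insertBy (fun a b => decide (k a < k b)) x ys).filter p := by
  induction ys with
  | nil => simp [PySem.List.insertBy, hx]
  | cons y ys ih =>
    have hpw := (List.pairwise_cons.mp hys).1
    have htail := (List.pairwise_cons.mp hys).2
    simp only [PySem.List.insertBy]
    by_cases hb : k x < k y
    · -- x goes before y; all of ys is ≥ k y > k x
      have hall : ∀ z ∈ ys.filter p, k x < k z := by
        intro z hz
        exact lt_of_lt_of_le hb (hpw z (List.mem_of_mem_filter hz))
      by_cases hp : p y = true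
      · simp [hb, hp, hx, PySem.List.insertBy]
      · simp only [decide_eq_true_eq, hb, if_pos, List.filter_cons, hp]
        simp only [Bool.false_eq_true, hx, if_pos]
        -- insertBy x (ys.filter p) = x :: ys.filter p since x is below everything
        cases hfy : ys.filter p with
        | nil => simp [PySem.List.insertBy]
        | cons z zs =>
          have hz : k x < k z := hall z (by rw [hfy]; exact List.mem_cons_self)
          simp [PySem.List.insertBy, hz]
    · by_cases hp : p y = true
      · simp [hp, PySem.List.insertBy, hb, ih htail]
      · simp [hp, hb, ih htail]

theorem pv_sorted_snoc {α κ : Type} [LinearOrder κ] (k : α → κ) (xs : List α) (x : α) :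
    PySem.List.sorted (xs ++ [x]) k
      = PySem.List.insertBy (fun a b => decide (k a < k b)) x (PySem.List.sorted xs k) := by
  rw [PySem.List.sorted_eq_foldl_insertBy, PySem.List.sorted_eq_foldl_insertBy, List.foldl_append]
  rfl

-- the stable sort commutes with filtering
theorem pv_sorted_filter {α κ : Type} [LinearOrder κ] (k : α → κ) (p : α → Bool) (l : List α) :
    PySem.List.sorted (l.filter p) k = (PySem.List.sorted l k).filter p := by
  induction l using List.reverseRecOn with
  | nil => simp [PySem.List.sorted]
  | append_singleton xs x ih =>
    rw [List.filter_append, pv_sorted_snoc]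
    by_cases hp : p x = true
    · simp only [List.filter_cons, hp, if_pos, List.filter_nil, pv_sorted_snoc, ih]
      exact pv_insertBy_filter k p x hp _ (PySem.List.sorted_pairwise xs k)
    · simp only [List.filter_cons, Bool.not_eq_true] at *
      simp [hp, ih, pv_filter_insertBy_neg _ p x hp]

-- grouped[key].append(pr e) loop: each code's list is the in-order projection of its entries
theorem pv_getD_group {β : Type} (key : Int × String × String → String)
    (pr : Int × String × String → β) (l : List (Int × String × String))
    (d : PySem.Dict String (List β)) (c : String) :
    (l.foldl (fun d e => d.modify (key e) [] (fun v => v ++ [pr e])) d).getD c []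
      = d.getD c [] ++ (l.filter (fun e => key e == c)).map pr := by
  induction l generalizing d with
  | nil => simp
  | cons e l ih =>
    simp only [List.foldl_cons, List.filter_cons, ih]
    by_cases hc : key e = c
    · simp [hc]
    · simp [hc, PySem.Dict.getD_modify, Ne.symm hc]

theorem pv_keys_group {β : Type} (key : Int × String × String → String)
    (pr : Int × String × String → β) (l : List (Int × String × String))
    (d : PySem.Dict String (List β)) :
    (l.foldl (fun d e => d.modify (key e) [] (fun v => v ++ [pr e])) d).keys
      = PySem.Set.update d.keys (l.map key) :=
  PySem.Dict.keys_foldl_modify_key l key [] (fun _ e v => v ++ [pr e]) d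

theorem pv_nodup_keys_group {β : Type} (key : Int × String × String → String)
    (pr : Int × String × String → β) (l : List (Int × String × String))
    (d : PySem.Dict String (List β)) (h : d.keys.Nodup) :
    (l.foldl (fun d e => d.modify (key e) [] (fun v => v ++ [pr e])) d).keys.Nodup :=
  PySem.Dict.nodup_keys_foldl_modify_key l key [] (fun _ e v => v ++ [pr e]) d h

theorem pv_update_nil {α : Type} [BEq α] (xs : List α) :
    PySem.Set.update ([] : PySem.Set α) xs = PySem.Set.ofList xs := rfl

theorem pv_items_build (codes : List String) (v : String → String × String) (h : codes.Nodup) :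
    (codes.foldl (fun r c => r.insert c (v c)) PySem.Dict.empty).items
      = codes.map (fun c => (c, v c)) := by
  have := PySem.Dict.items_foldl_insert_fresh codes (fun c => c) v PySem.Dict.empty
    (by intro a _; simp) (by simpa using h)
  simpa using this

-- per-code values agree: sorting the group's (hw_id, lemma) pairs = the group's slice of the globally sorted list
theorem pv_val_eq (entries : List (Int × String × String)) (c : String) :
    (let members := PySem.List.sorted
        ((entries.filter (fun e => e.2.2 == c)).map (fun e => (e.1, e.2.1))) (fun x => x.1)
     ((((PySem.List.pyGet? members 0).getD (0, "")).2 : String),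
      PySem.Str.join "; " ((PySem.List.slice members (some 1) none).map (fun x => x.2))))
  = (let lemmas := ((PySem.List.sorted entries (fun e => e.1)).filter (fun e => e.2.2 == c)).map
        (fun e => e.2.1)
     ((PySem.List.pyGet? lemmas 0).getD "",
      PySem.Str.join "; " (PySem.List.slice lemmas (some 1) none))) := by
  have h1 : PySem.List.sorted
        ((entries.filter (fun e => e.2.2 == c)).map (fun e => (e.1, e.2.1))) (fun x => x.1)
      = ((PySem.List.sorted entries (fun e => e.1)).filter (fun e => e.2.2 == c)).map
          (fun e => (e.1, e.2.1)) := by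
    rw [pv_sorted_map (fun e : Int × String × String => (e.1, e.2.1)) (fun x => x.1)
        (fun e => e.1) (fun a => rfl), pv_sorted_filter]
  simp only [h1]
  generalize (PySem.List.sorted entries (fun e => e.1)).filter (fun e => e.2.2 == c) = S
  simp only [Prod.mk.injEq]
  constructor
  · cases S with
    | nil => simp [PySem.List.pyGet?]
    | cons s S => simp
  · rw [PySem.List.slice_from _ (by norm_num), PySem.List.slice_from _ (by norm_num)]
    simp [← List.map_drop, Function.comp_def]

-- A's pipeline, flattened: dedup'd codes, each paired with its sorted members' value
theorem pv_A_eq (entries : List (Int × String × String)) :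
    group_by_code entries
      = (PySem.List.dedup (entries.map (fun e => e.2.2))).map (fun c =>
          (c, let members := PySem.List.sorted
                ((entries.filter (fun e => e.2.2 == c)).map (fun e => (e.1, e.2.1))) (fun x => x.1)
              (((PySem.List.pyGet? members 0).getD (0, "")).2,
               PySem.Str.join "; "
                 ((PySem.List.slice members (some 1) none).map (fun x => x.2))))) := by
  unfold group_by_code
  have hkeys : (entries.foldl
        (fun d e => d.modify e.2.2 [] (fun v => v ++ [(e.1, e.2.1)])) PySem.Dict.empty).keys
      = PySem.List.dedup (entries.map (fun e => e.2.2)) := by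
    have h := pv_keys_group (fun e => e.2.2) (fun e => (e.1, e.2.1)) entries PySem.Dict.empty
    simpa [pv_update_nil] using h
  have hnodup := pv_nodup_keys_group (fun e => e.2.2) (fun e => (e.1, e.2.1)) entries
    PySem.Dict.empty (by simp)
  have hitems : (entries.foldl
        (fun d e => d.modify e.2.2 [] (fun v => v ++ [(e.1, e.2.1)])) PySem.Dict.empty).items
      = (PySem.List.dedup (entries.map (fun e => e.2.2))).map (fun c =>
          (c, (entries.filter (fun e => e.2.2 == c)).map (fun e => (e.1, e.2.1)))) := by
    rw [PySem.Dict.items_eq_map_keys _ hnodup [], hkeys]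
    refine List.map_congr_left (fun c _ => ?_)
    rw [Prod.mk.injEq]
    refine ⟨rfl, ?_⟩
    have h := pv_getD_group (fun e => e.2.2) (fun e => (e.1, e.2.1)) entries PySem.Dict.empty c
    simpa using h
  simp only [hitems, List.foldl_map]
  exact pv_items_build _ _ (PySem.List.nodup_dedup _)

-- B's pipeline, flattened the same way
theorem pv_B_eq (entries : List (Int × String × String)) :
    group_by_code_alt entries
      = (PySem.List.dedup (entries.map (fun e => e.2.2))).map (fun c =>
          (c, let lemmas := ((PySem.List.sorted entries (fun e => e.1)).filter
                (fun e => e.2.2 == c)).map (fun e => e.2.1)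
              ((PySem.List.pyGet? lemmas 0).getD "",
               PySem.Str.join "; " (PySem.List.slice lemmas (some 1) none)))) := by
  unfold group_by_code_alt
  have hgetD : ∀ c, ((PySem.List.sorted entries (fun e => e.1)).foldl
        (fun d e => d.modify e.2.2 [] (fun v => v ++ [e.2.1])) PySem.Dict.empty).getD c []
      = ((PySem.List.sorted entries (fun e => e.1)).filter
          (fun e => e.2.2 == c)).map (fun e => e.2.1) := by
    intro c
    have h := pv_getD_group (fun e => e.2.2) (fun e => e.2.1)
      (PySem.List.sorted entries (fun e => e.1)) PySem.Dict.empty c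
    simpa using h
  simp only [← PySem.Dict.getD_eq_get?_getD, hgetD]
  exact pv_items_build _ _ (PySem.List.nodup_dedup _)

theorem group_by_code_spec : Claim_equal_group_by_code := by
  intro entries _
  unfold Spec_group_by_code
  rw [pv_A_eq, pv_B_eq]
  refine List.map_congr_left (fun c _ => ?_)
  rw [Prod.mk.injEq]
  exact ⟨rfl, pv_val_eq entries c⟩

-- ===== VERDICT (by name: the statement is the Claim_ definition above) =====
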